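-- pv_equiv track=rewrite | github.com/Chrisvossetje/comodules | tools/group_to_coalg.py | permutation_multiplication_table
-- ===== SOURCE A (Python) =====
-- import itertools
--
-- def compose(p1, p2):
--     """Return the composition of two permutations: p1 after p2"""
--     return tuple(p1[i] for i in p2)
--
-- def permutation_multiplication_table(n):
--     perms = list(itertools.permutations(range(n)))
--     index_map = {p: i for i, p in enumerate(perms)}
--
--     size = len(perms)
--     table = [[0]*size for _ in range(size)]
--
--     for i, p1 in enumerate(perms):
--         for j, p2 in enumerate(perms):
--             composed = compose(p1, p2)
--             table[i][j] = index_map[composed]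
--
--     return perms, table
-- ===== SOURCE B (Python) =====
-- import itertools
--
-- def permutation_multiplication_table(n):
--     perms = list(itertools.permutations(range(n)))
--
--     def rank(t):
--         # lexicographic rank of t among permutations of range(n):
--         # Horner-evaluated Lehmer code, no index map needed
--         r = 0
--         rest = t
--         while rest:
--             v = rest[0]
--             rest = rest[1:]
--             r = r * (len(rest) + 1) + sum(1 for w in rest if w < v)
--         return r
--
--     table = [[rank(tuple(p1[x] for x in p2)) for p2 in perms] for p1 in perms]
--     return perms, table
-- ===== Notes on version B (the rewrite author's own statement) =====
-- stated objective: alternative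
-- what changed: Drops the index_map dictionary: each cell's index is computed directly as the lexicographic rank of the composed permutation via a Horner-evaluated Lehmer code (count of smaller later elements per position), relying on itertools emitting permutations in lexicographic order.
import Mathlib
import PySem

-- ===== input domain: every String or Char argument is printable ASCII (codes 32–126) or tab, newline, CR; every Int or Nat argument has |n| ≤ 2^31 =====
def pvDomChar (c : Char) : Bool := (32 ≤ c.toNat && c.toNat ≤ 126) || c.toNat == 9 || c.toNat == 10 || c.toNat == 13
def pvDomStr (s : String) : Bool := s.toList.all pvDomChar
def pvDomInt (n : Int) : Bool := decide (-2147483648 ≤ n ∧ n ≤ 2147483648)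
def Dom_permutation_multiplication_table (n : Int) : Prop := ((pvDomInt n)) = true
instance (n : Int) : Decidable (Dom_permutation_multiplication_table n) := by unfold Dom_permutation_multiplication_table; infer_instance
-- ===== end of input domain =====

-- B replaces A's permutation->index dictionary by computing each cell's index directly as the
-- lexicographic rank of the composed permutation (Horner-evaluated Lehmer code); an alternative
-- decomposition of the same computation, not claimed faster.



-- ===== PORT A =====
-- compose(p1, p2) = tuple(p1[i] for i in p2); p1[i] ported with pyGetD (every index reaching it is in range)
def pvCompose (p1 p2 : List Int) : List Int := p2.map (fun i => PySem.List.pyGetD p1 i 0)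

def permutation_multiplication_table (n : Int) : List (List Int) × List (List Int) :=
  let rng := PySem.List.pyRange 0 n 1
  let perms := PySem.List.permutations rng rng.length
  let index_map : PySem.Dict (List Int) Int :=
    (PySem.List.enumerate perms 0).foldl (fun d ip => d.insert ip.2 ip.1) PySem.Dict.empty
  let size := PySem.List.len perms
  let table0 : List (List Int) :=
    (PySem.List.pyRange 0 size 1).map (fun _ => PySem.List.pyRepeat [(0:Int)] size)
  let table := (PySem.List.enumerate perms 0).foldl (fun tbl ip =>
      (PySem.List.enumerate perms 0).foldl (fun tbl jp =>
        PySem.List.pySetD tbl ip.1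
          (PySem.List.pySetD (PySem.List.pyGetD tbl ip.1 []) jp.1
            (PySem.Dict.getD index_map (pvCompose ip.2 jp.2) 0))) tbl) table0
  (perms, table)

-- ===== PORT B =====
-- pvRankLoop is rank()'s while loop: state (r, rest); rest[0] = v, rest[1:] = rest'
def pvRankLoop (r : Int) (rest : List Int) : Int :=
  match rest with
  | [] => r
  | v :: rest' =>
      pvRankLoop (r * (PySem.List.len rest' + 1)
                  + ((rest'.map (fun w => if w < v then (1:Int) else 0)).sum)) rest'

def permutation_multiplication_table_alt (n : Int) : List (List Int) × List (List Int) :=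
  let perms := PySem.List.permutations (PySem.List.pyRange 0 n 1) (PySem.List.pyRange 0 n 1).length
  let table := perms.map (fun p1 => perms.map (fun p2 =>
      pvRankLoop 0 (p2.map (fun x => PySem.List.pyGetD p1 x 0))))
  (perms, table)

-- ===== PRECONDITION & SPEC =====
def Spec_permutation_multiplication_table (n : Int) (out : List (List Int) × List (List Int)) : Prop := out = permutation_multiplication_table_alt n
instance (n : Int) (out : List (List Int) × List (List Int)) : Decidable (Spec_permutation_multiplication_table n out) := by unfold Spec_permutation_multiplication_table; infer_instance

-- ===== CLAIM (what is proved, stated in full; the proofs are below) =====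
def Claim_equal_permutation_multiplication_table : Prop := ∀ (n : Int), Dom_permutation_multiplication_table n → Spec_permutation_multiplication_table n (permutation_multiplication_table n)

-- ===== LEMMAS AND PROOFS =====
def rankN : List Int → Nat
  | [] => 0
  | v :: t => t.countP (fun w => decide (w < v)) * Nat.factorial t.length + rankN t

theorem perms_succ (xs : List Int) (r : Nat) :
  PySem.List.permutations xs (r+1) =
    (List.range xs.length).flatMap (fun i =>
      match xs[i]? with
      | none => []
      | some v => (PySem.List.permutations (xs.eraseIdx i) r).map (fun p => v :: p)) := by
  simp only [PySem.List.permutations]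
  congr 1
  funext i
  cases xs[i]? <;> rfl

theorem perms_len : ∀ (m : Nat) (xs : List Int), xs.length = m →
    (PySem.List.permutations xs m).length = Nat.factorial m := by
  intro m
  induction m with
  | zero => intro xs h; simp [PySem.List.permutations_zero]
  | succ m ih =>
    intro xs h
    rw [perms_succ, List.length_flatMap]
    have : ∀ i ∈ List.range xs.length,
        ((match xs[i]? with
          | none => ([] : List (List Int))
          | some v => (PySem.List.permutations (xs.eraseIdx i) m).map (fun p => v :: p)).length) = Nat.factorial m := by
      intro i hi
      rw [List.mem_range] at hi
      rw [List.getElem?_eq_getElem hi]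
      simp only [List.length_map]
      exact ih _ (by rw [List.length_eraseIdx_of_lt hi]; omega)
    rw [List.map_congr_left this]
    simp [h, Nat.factorial_succ, Nat.mul_comm]

theorem nodup_flatMap' (f : Nat → List (List Int)) :
    ∀ (l : List Nat), (∀ i ∈ l, (f i).Nodup) →
    l.Pairwise (fun i j => ∀ x, x ∈ f i → x ∉ f j) → (l.flatMap f).Nodup := by
  intro l
  induction l with
  | nil => intro _ _; simp
  | cons a l ih =>
    intro h1 h2
    rw [List.flatMap_cons, List.nodup_append]
    refine ⟨h1 a (by simp), ih (fun i hi => h1 i (by simp [hi])) (List.Pairwise.sublist (by simp) h2), ?_⟩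
    intro x hx y hy
    rw [List.mem_flatMap] at hy
    obtain ⟨j, hj, hyj⟩ := hy
    intro hxy
    exact (List.rel_of_pairwise_cons h2 hj) x hx (hxy ▸ hyj)

theorem sorted_countP (xs : List Int) (h : List.Pairwise (· < ·) xs) (i : Nat) (hi : i < xs.length) :
    (xs.eraseIdx i).countP (fun w => decide (w < xs[i])) = i := by
  rw [List.eraseIdx_eq_take_drop_succ, List.countP_append]
  rw [List.pairwise_iff_getElem] at h
  have h1 : (xs.take i).countP (fun w => decide (w < xs[i])) = i := by
    rw [List.countP_eq_length.mpr, List.length_take_of_le (by omega)]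
    intro a ha
    rw [List.mem_take_iff_getElem] at ha
    obtain ⟨j, hj, rfl⟩ := ha
    simpa using h j i (by omega) hi (by omega)
  have h2 : (xs.drop (i+1)).countP (fun w => decide (w < xs[i])) = 0 := by
    rw [List.countP_eq_zero]
    intro a ha
    rw [List.mem_drop_iff_getElem] at ha
    obtain ⟨j, hj, rfl⟩ := ha
    simpa using le_of_lt (h i (i+1+j) hi (by omega) (by omega))
  omega

theorem idxOf_map_cons (a : Int) (t : List Int) :
    ∀ (l : List (List Int)), t ∈ l → (l.map (a :: ·)).idxOf (a :: t) = l.idxOf t := by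
  intro l
  induction l with
  | nil => simp
  | cons b l ih =>
    intro hm
    by_cases hbt : b = t
    · subst hbt; simp
    · have : (a :: b) ≠ (a :: t) := by simp [hbt]
      rw [List.map_cons, List.idxOf_cons_ne _ (by simpa using this), List.idxOf_cons_ne _ (by simpa using hbt),
        ih ((List.mem_cons.mp hm).resolve_left (fun he => hbt he.symm))]

theorem mem_perms_succ_iff (xs : List Int) (m : Nat) (p : List Int) :
    p ∈ PySem.List.permutations xs (m+1) ↔
      ∃ (i : Nat) (hi : i < xs.length) (t : List Int),
        t ∈ PySem.List.permutations (xs.eraseIdx i) m ∧ p = xs[i] :: t := by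
  rw [perms_succ, List.mem_flatMap]
  constructor
  · rintro ⟨i, hi, hp⟩
    rw [List.mem_range] at hi
    rw [List.getElem?_eq_getElem hi] at hp
    simp only [List.mem_map] at hp
    obtain ⟨t, ht, rfl⟩ := hp
    exact ⟨i, hi, t, ht, rfl⟩
  · rintro ⟨i, hi, t, ht, rfl⟩
    refine ⟨i, List.mem_range.mpr hi, ?_⟩
    rw [List.getElem?_eq_getElem hi]
    simp only [List.mem_map]
    exact ⟨t, ht, rfl⟩

theorem nodup_perms : ∀ (m : Nat) (xs : List Int), xs.length = m → xs.Nodup →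
    (PySem.List.permutations xs m).Nodup := by
  intro m
  induction m with
  | zero => intro xs h _; simp [PySem.List.permutations_zero]
  | succ m ih =>
    intro xs h hnd
    rw [perms_succ]
    apply nodup_flatMap'
    · intro i hi
      rw [List.mem_range] at hi
      rw [List.getElem?_eq_getElem hi]
      exact (ih _ (by rw [List.length_eraseIdx_of_lt hi]; omega)
        (hnd.sublist (List.eraseIdx_sublist _ _))).map (fun a b hab => by injection hab)
    · rw [List.pairwise_iff_getElem]
      intro a b ha hb hab
      simp only [List.length_range] at ha hb
      simp only [List.getElem_range]
      rw [List.getElem?_eq_getElem hb, List.getElem?_eq_getElem (by omega : a < xs.length)]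
      intro x hxa hxb
      simp only [List.mem_map] at hxa hxb
      obtain ⟨t1, _, rfl⟩ := hxa
      obtain ⟨t2, _, he⟩ := hxb
      have : xs[b] = xs[a] := by injection he
      exact absurd (List.Nodup.getElem_inj_iff hnd |>.mp this.symm) (by omega)

theorem mem_perms_of_perm : ∀ (m : Nat) (xs p : List Int), xs.length = m → xs.Nodup →
    p.Perm xs → p ∈ PySem.List.permutations xs m := by
  intro m
  induction m with
  | zero =>
    intro xs p h _ hp
    have : p = [] := List.eq_nil_of_length_eq_zero (by rw [hp.length_eq, h])
    simp [PySem.List.permutations_zero, this]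
  | succ m ih =>
    intro xs p h hnd hp
    rcases p with _ | ⟨v, t⟩
    · exact absurd (hp.length_eq.trans h) (by simp)
    · have hv : v ∈ xs := hp.mem_iff.mp (by simp)
      have hidx : xs.idxOf v < xs.length := List.idxOf_lt_length_of_mem hv
      rw [mem_perms_succ_iff]
      refine ⟨xs.idxOf v, hidx, t, ?_, by rw [List.getElem_idxOf]⟩
      apply ih
      · rw [List.length_eraseIdx_of_lt hidx]; omega
      · exact hnd.sublist (List.eraseIdx_sublist _ _)
      · rw [List.eraseIdx_idxOf_eq_erase]
        have := List.cons_perm_iff_perm_erase.mp hp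
        exact this.2

theorem idxOf_eq_rankN : ∀ (m : Nat) (xs : List Int), xs.length = m →
    xs.Pairwise (· < ·) → ∀ p ∈ PySem.List.permutations xs m,
    (PySem.List.permutations xs m).idxOf p = rankN p := by
  intro m
  induction m with
  | zero =>
    intro xs h _ p hp
    rw [PySem.List.permutations_zero] at hp ⊢
    simp only [List.mem_singleton] at hp
    subst hp
    simp [rankN]
  | succ m ih =>
    intro xs h hs p hp
    have hnd : xs.Nodup := hs.nodup
    rw [mem_perms_succ_iff] at hp
    obtain ⟨i, hi, t, ht, rfl⟩ := hp
    have hsub_len : (xs.eraseIdx i).length = m := by rw [List.length_eraseIdx_of_lt hi]; omega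
    have hsub_sorted : (xs.eraseIdx i).Pairwise (· < ·) := hs.sublist (List.eraseIdx_sublist _ _)
    have htlen : t.length = m := PySem.List.length_of_mem_permutations ht
    have htperm : t.Perm (xs.eraseIdx i) := by
      apply PySem.List.perm_of_mem_permutations (p := t) (xs := xs.eraseIdx i)
      rw [hsub_len]; exact ht
    -- the Lehmer digit: elements of t smaller than xs[i] are exactly the i earlier elements of xs
    have hcount : t.countP (fun w => decide (w < xs[i])) = i := by
      have hc2 : t.countP (fun w => decide (w < xs[i])) = (xs.eraseIdx i).countP (fun w => decide (w < xs[i])) :=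
        List.Perm.countP_congr htperm (fun x => congrFun rfl)
      rw [hc2, sorted_countP xs hs i hi]
    -- decompose the flatMap at block i
    rw [perms_succ]
    set f : Nat → List (List Int) := fun j =>
      match xs[j]? with
      | none => []
      | some v => (PySem.List.permutations (xs.eraseIdx j) m).map (fun q => v :: q) with hf
    have hblock : ∀ (j : Nat) (hj : j < xs.length), f j = (PySem.List.permutations (xs.eraseIdx j) m).map (fun q => xs[j]'hj :: q) := by
      intro j hj; rw [hf]; simp only [List.getElem?_eq_getElem hj]
    have hr : List.range (m+1) = List.range i ++ (List.range (m+1-i)).map (i + ·) := by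
      conv_lhs => rw [show m+1 = i + (m+1-i) from by omega]
      exact List.range_add
    rw [h, hr, List.flatMap_append]
    have hnotmem : (xs[i] :: t) ∉ (List.range i).flatMap f := by
      intro hmem
      rw [List.mem_flatMap] at hmem
      obtain ⟨j, hj, hmemj⟩ := hmem
      rw [List.mem_range] at hj
      rw [hblock j (by omega)] at hmemj
      simp only [List.mem_map] at hmemj
      obtain ⟨q, _, he⟩ := hmemj
      have hjlen : j < xs.length := by omega
      have : xs[j] = xs[i] := by injection he
      exact absurd (hnd.getElem_inj_iff.mp this) (by omega)
    rw [List.idxOf_append_of_notMem hnotmem]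
    have hlen1 : ((List.range i).flatMap f).length = i * Nat.factorial m := by
      rw [List.length_flatMap]
      have : ∀ j ∈ List.range i, (f j).length = Nat.factorial m := by
        intro j hj
        rw [List.mem_range] at hj
        rw [hblock j (by omega), List.length_map]
        exact perms_len m _ (by rw [List.length_eraseIdx_of_lt (by omega)]; omega)
      rw [List.map_congr_left this]
      simp [List.map_const']
    have hrange2 : (List.range (m+1-i)).map (i + ·) = i :: ((List.range (m-i)).map (fun k => i + (k+1))) := by
      have h1 : m + 1 - i = (m - i) + 1 := by omega
      rw [h1, List.range_succ_eq_map]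
      simp [List.map_map, Function.comp_def]
    rw [hrange2, List.flatMap_cons]
    have hmemfi : (xs[i] :: t) ∈ f i := by
      rw [hblock i hi]
      exact List.mem_map.mpr ⟨t, ht, rfl⟩
    rw [List.idxOf_append_of_mem hmemfi, hblock i hi,
      idxOf_map_cons _ _ _ ht]
    rw [ih (xs.eraseIdx i) hsub_len hsub_sorted t ht]
    rw [hlen1]
    rw [show rankN (xs[i] :: t) = t.countP (fun w => decide (w < xs[i])) * Nat.factorial t.length + rankN t from rfl,
      hcount, htlen]

theorem pvRankLoop_eq : ∀ (t : List Int) (r : Int),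
    pvRankLoop r t = r * (Nat.factorial t.length : Int) + (rankN t : Int) := by
  intro t
  induction t with
  | nil => intro r; simp [pvRankLoop, rankN]
  | cons v t ih =>
    intro r
    rw [pvRankLoop, ih]
    rw [show (List.map (fun w => if w < v then (1:Int) else 0) t)
          = (List.map (fun w => if decide (w < v) = true then (1:Int) else 0) t) from by simp]
    rw [PySem.List.sum_map_ite_one_zero (fun w => decide (w < v)) t]
    show (r * (PySem.List.len t + 1) + (t.countP (fun w => decide (w < v)) : Int)) * (Nat.factorial t.length : Int) + (rankN t : Int)
      = r * (Nat.factorial (v :: t).length : Int) + (rankN (v :: t) : Int)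
    rw [show rankN (v :: t) = t.countP (fun w => decide (w < v)) * Nat.factorial t.length + rankN t from rfl]
    rw [PySem.List.len_eq]
    simp only [List.length_cons, Nat.factorial_succ]
    push_cast
    ring

theorem fill_row {α : Type} (g : α → Int) :
    ∀ (ys : List α) (pre cur : List Int), cur.length = ys.length →
    (PySem.List.enumerate ys (pre.length : Int)).foldl
        (fun r jp => PySem.List.pySetD r jp.1 (g jp.2)) (pre ++ cur)
      = pre ++ ys.map g := by
  intro ys
  induction ys with
  | nil =>
    intro pre cur hc
    rw [List.eq_nil_of_length_eq_zero hc]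
    simp [PySem.List.enumerate_nil]
  | cons y ys ih =>
    intro pre cur hc
    rcases cur with _ | ⟨c0, cur'⟩
    · simp at hc
    · rw [PySem.List.enumerate_cons, List.foldl_cons]
      have h1 : PySem.List.pySetD (pre ++ c0 :: cur') ((pre.length : Int)) (g y) = pre ++ g y :: cur' := by
        rw [PySem.List.pySetD_natCast]
        simp
      rw [h1]
      have h2 : pre ++ g y :: cur' = (pre ++ [g y]) ++ cur' := by simp
      have h3 : (pre.length : Int) + 1 = ((pre ++ [g y]).length : Int) := by
        simp [List.length_append]
      rw [h2, h3, ih (pre ++ [g y]) cur' (by simpa using Nat.succ_injective hc)]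
      simp

theorem inner_fold_row {α : Type} (g : α → Int) (i : Nat) :
    ∀ (l : List (Int × α)) (tbl : List (List Int)), i < tbl.length →
    l.foldl (fun t jp => PySem.List.pySetD t (i : Int)
        (PySem.List.pySetD (PySem.List.pyGetD t (i : Int) []) jp.1 (g jp.2))) tbl
      = PySem.List.pySetD tbl (i : Int)
          (l.foldl (fun r jp => PySem.List.pySetD r jp.1 (g jp.2))
            (PySem.List.pyGetD tbl (i : Int) [])) := by
  intro l
  induction l with
  | nil =>
    intro tbl hi
    simp only [List.foldl_nil]
    rw [PySem.List.pySetD_natCast, PySem.List.pyGetD_natCast, List.getD_eq_getElem _ _ hi,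
      List.set_getElem_self]
  | cons jp l ih =>
    intro tbl hi
    rw [List.foldl_cons, List.foldl_cons]
    rw [ih (PySem.List.pySetD tbl (i : Int)
          (PySem.List.pySetD (PySem.List.pyGetD tbl (i : Int) []) jp.1 (g jp.2)))
        (by simpa using hi)]
    rw [PySem.List.pySetD_natCast, PySem.List.pySetD_natCast, PySem.List.pySetD_natCast,
      PySem.List.pyGetD_natCast, PySem.List.pyGetD_natCast]
    rw [List.getD_eq_getElem _ _ hi]
    rw [List.getD_eq_getElem _ _ (show i < (tbl.set i _).length by simpa using hi)]
    rw [List.getElem_set_self, List.set_set]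

theorem fill_table {α : Type} (g : α → α → Int) (ys : List α) :
    ∀ (zs : List α) (pre cur : List (List Int)), cur.length = zs.length →
    (∀ row ∈ cur, row.length = ys.length) →
    (PySem.List.enumerate zs (pre.length : Int)).foldl
        (fun tbl ip => (PySem.List.enumerate ys 0).foldl
          (fun tbl jp => PySem.List.pySetD tbl ip.1
            (PySem.List.pySetD (PySem.List.pyGetD tbl ip.1 []) jp.1 (g ip.2 jp.2))) tbl)
        (pre ++ cur)
      = pre ++ zs.map (fun p1 => ys.map (g p1)) := by
  intro zs
  induction zs with
  | nil =>
    intro pre cur hc _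
    rw [List.eq_nil_of_length_eq_zero hc]
    simp [PySem.List.enumerate_nil]
  | cons z zs ih =>
    intro pre cur hc hrows
    rcases cur with _ | ⟨c0, cur'⟩
    · simp at hc
    · rw [PySem.List.enumerate_cons, List.foldl_cons]
      have hstep : (PySem.List.enumerate ys 0).foldl
          (fun tbl jp => PySem.List.pySetD tbl ((pre.length : Int), z).1
            (PySem.List.pySetD (PySem.List.pyGetD tbl ((pre.length : Int), z).1 []) jp.1
              (g ((pre.length : Int), z).2 jp.2))) (pre ++ c0 :: cur')
          = pre ++ (ys.map (g z)) :: cur' := by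
        rw [inner_fold_row (g z) pre.length (PySem.List.enumerate ys 0) (pre ++ c0 :: cur')
          (by simp)]
        have hget : PySem.List.pyGetD (pre ++ c0 :: cur') ((pre.length : Int)) [] = c0 := by
          rw [PySem.List.pyGetD_natCast]
          rw [List.getD_eq_getElem _ _ (by simp)]
          simp
        rw [hget]
        have := fill_row (g z) ys ([] : List Int) c0 (hrows c0 (by simp))
        simp only [List.length_nil, Nat.cast_zero, List.nil_append] at this
        rw [this]
        rw [PySem.List.pySetD_natCast]
        simp
      rw [hstep]
      have h2 : pre ++ ys.map (g z) :: cur' = (pre ++ [ys.map (g z)]) ++ cur' := by simp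
      have h3 : (pre.length : Int) + 1 = ((pre ++ [ys.map (g z)]).length : Int) := by
        simp [List.length_append]
      rw [h2, h3, ih (pre ++ [ys.map (g z)]) cur' (by simpa using Nat.succ_injective hc)
        (fun row hr => hrows row (by simp [List.mem_cons]; tauto))]
      simp

theorem dict_items : ∀ (l : List (List Int)) (s : Int) (d : PySem.Dict (List Int) Int),
    (∀ x ∈ l, d.contains x = false) → l.Nodup →
    ((PySem.List.enumerate l s).foldl (fun d ip => d.insert ip.2 ip.1) d).items
      = d.items ++ (PySem.List.enumerate l s).map (fun ip => (ip.2, ip.1)) := by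
  intro l
  induction l with
  | nil => intro s d _ _; simp [PySem.List.enumerate_nil]
  | cons x l ih =>
    intro s d hfresh hnd
    rw [PySem.List.enumerate_cons, List.foldl_cons, List.map_cons]
    have hins : d.insert x s = ⟨d.items ++ [(x, s)]⟩ := by
      simp [PySem.Dict.insert, hfresh x (by simp)]
    rw [hins]
    rw [ih (s+1) ⟨d.items ++ [(x, s)]⟩ ?_ hnd.of_cons]
    · simp
    · intro y hy
      have h1 : d.contains y = false := hfresh y (by simp [hy])
      have h2 : x ≠ y := fun he => (List.nodup_cons.mp hnd).1 (he ▸ hy)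
      simp only [PySem.Dict.contains, List.any_append, List.any_cons, List.any_nil] at h1 ⊢
      simp [h1, h2]

theorem assoc_find : ∀ (l : List (List Int)) (s : Int) (p : List Int), l.Nodup → p ∈ l →
    List.find? (fun kv => kv.1 == p) ((PySem.List.enumerate l s).map (fun ip => (ip.2, ip.1)))
      = some (p, s + (l.idxOf p : Int)) := by
  intro l
  induction l with
  | nil => intro s p _ hp; simp at hp
  | cons a l ih =>
    intro s p hnd hp
    rw [PySem.List.enumerate_cons, List.map_cons, List.find?_cons]
    by_cases hap : a = p
    · subst hap
      simp
    · have hbeq : ((a, s).1 == p) = false := by simpa using hap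
      rw [hbeq]
      rw [ih (s+1) p hnd.of_cons ((List.mem_cons.mp hp).resolve_left (fun he => hap he.symm))]
      rw [List.idxOf_cons_ne _ (by simpa using hap)]
      show some (p, s + 1 + (List.idxOf p l : Int)) = _
      rw [Option.some.injEq, Prod.mk.injEq]
      refine ⟨rfl, ?_⟩
      push_cast
      ring

theorem rng_sorted (n : Int) : (PySem.List.pyRange 0 n 1).Pairwise (· < ·) :=
  PySem.List.pairwise_lt_pyRange_one 0 n

theorem rng_self {n : Int} (p1 : List Int) (h : p1.length = (PySem.List.pyRange 0 n 1).length) :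
    PySem.List.pyRange 0 (PySem.List.len p1) 1 = PySem.List.pyRange 0 n 1 := by
  rw [PySem.List.len_eq, h, PySem.List.length_pyRange_one]
  by_cases hn : 0 ≤ n
  · congr 1
    omega
  · rw [PySem.List.pyRange_one_eq_nil (by omega), PySem.List.pyRange_one_eq_nil (by omega)]

theorem compose_mem (n : Int) (p1 p2 : List Int)
    (h1 : p1 ∈ PySem.List.permutations (PySem.List.pyRange 0 n 1) (PySem.List.pyRange 0 n 1).length)
    (h2 : p2 ∈ PySem.List.permutations (PySem.List.pyRange 0 n 1) (PySem.List.pyRange 0 n 1).length) :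
    pvCompose p1 p2 ∈ PySem.List.permutations (PySem.List.pyRange 0 n 1) (PySem.List.pyRange 0 n 1).length := by
  have hp1 := PySem.List.perm_of_mem_permutations h1
  have hp2 := PySem.List.perm_of_mem_permutations h2
  apply mem_perms_of_perm _ _ _ rfl (rng_sorted n).nodup
  have hmap : (PySem.List.pyRange 0 n 1).map (fun i => PySem.List.pyGetD p1 i 0) = p1 := by
    rw [← rng_self (n := n) p1 hp1.length_eq]
    exact PySem.List.map_pyGetD_pyRange_zero p1 0
  have hstep : (pvCompose p1 p2).Perm ((PySem.List.pyRange 0 n 1).map (fun i => PySem.List.pyGetD p1 i 0)) :=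
    hp2.map _
  rw [hmap] at hstep
  exact hstep.trans hp1

theorem main_eq (n : Int) :
    permutation_multiplication_table n = permutation_multiplication_table_alt n := by
  simp only [permutation_multiplication_table, permutation_multiplication_table_alt]
  have hsorted := rng_sorted n
  have hnd : (PySem.List.pyRange 0 n 1).Nodup := hsorted.nodup
  set rng := PySem.List.pyRange 0 n 1 with hrng
  set perms := PySem.List.permutations rng rng.length with hperms
  have hpnodup : perms.Nodup := nodup_perms rng.length rng rfl hnd
  set dm := (PySem.List.enumerate perms 0).foldl (fun d ip => d.insert ip.2 ip.1)
    (PySem.Dict.empty : PySem.Dict (List Int) Int) with hdm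
  have hitems : dm.items = (PySem.List.enumerate perms 0).map (fun ip => (ip.2, ip.1)) := by
    rw [hdm]
    have := dict_items perms 0 PySem.Dict.empty
      (fun x _ => by simp [PySem.Dict.contains, PySem.Dict.empty]) hpnodup
    simpa [PySem.Dict.empty] using this
  have hgetD : ∀ p ∈ perms, PySem.Dict.getD dm p 0 = (perms.idxOf p : Int) := by
    intro p hp
    rw [PySem.Dict.getD, PySem.Dict.get?, hitems, assoc_find perms 0 p hpnodup hp]
    simp
  -- the zero table
  have htable0 : (PySem.List.pyRange 0 (PySem.List.len perms) 1).map
      (fun _ => PySem.List.pyRepeat [(0:Int)] (PySem.List.len perms))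
      = List.replicate perms.length (List.replicate perms.length (0:Int)) := by
    rw [PySem.List.len_eq, PySem.List.pyRepeat_singleton, List.map_const',
      PySem.List.length_pyRange_one]
    simp
  rw [htable0]
  -- fill the table
  have hfill := fill_table (fun p1 p2 => PySem.Dict.getD dm (pvCompose p1 p2) 0) perms perms
    ([] : List (List Int)) (List.replicate perms.length (List.replicate perms.length (0:Int)))
    (by simp) (by intro row hr; rw [List.eq_of_mem_replicate hr]; simp)
  simp only [List.length_nil, Nat.cast_zero, List.nil_append] at hfill
  rw [hfill]
  -- pointwise equality of the two tables
  refine congrArg (Prod.mk perms) ?_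
  apply List.map_congr_left
  intro p1 h1
  apply List.map_congr_left
  intro p2 h2
  have hcm := compose_mem n p1 p2 h1 h2
  rw [hgetD _ hcm, idxOf_eq_rankN rng.length rng rfl hsorted _ hcm]
  rw [show p2.map (fun x => PySem.List.pyGetD p1 x 0) = pvCompose p1 p2 from rfl]
  rw [pvRankLoop_eq]
  simp

-- ===== VERDICT (by name: the statement is the Claim_ definition above) =====
theorem permutation_multiplication_table_spec : Claim_equal_permutation_multiplication_table := by
  intro n _
  exact main_eq n
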